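-- pv_equiv track=rewrite | github.com/Tang-Moyan/G20_SciCite | SearchEngine/scorer/search_engine.py | promote_relevant_docs
-- ===== SOURCE A (Python) =====
-- def promote_relevant_docs(relevant_docs, scored_documents):
--     """
--     Intercept the results and put the (initial) relevant docs at the top
--
--     :param set[int] relevant_docs: the set of documents deemed relevant.
--     :param list[int] scored_documents: the list of documents ranked by descending cosine score
--     :return: the list of documents ranked by descending cosine score with relevant docs at the
--      top in the order of appearance in the original ranked list
--     """
--     if not relevant_docs:
--         # if there are no relevant docs, we return the original list
--         return scored_documents
--
--     extracted_relevant_docs = list()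
--     for doc_id in scored_documents:
--         if doc_id in relevant_docs:
--             extracted_relevant_docs.append(doc_id)
--     scored_documents = extracted_relevant_docs + [doc_id for doc_id in scored_documents if
--                                                   doc_id not in relevant_docs]
--     return scored_documents
-- ===== SOURCE B (Python) =====
-- def promote_relevant_docs(relevant_docs, scored_documents):
--     if not relevant_docs:
--         # if there are no relevant docs, we return the original list
--         return scored_documents
--     # stable sort: relevant docs (key False) first, both groups keep original order
--     return sorted(scored_documents, key=lambda d: d not in relevant_docs)
-- ===== Notes on version B (the rewrite author's own statement) =====
-- stated objective: idiomatic
-- what changed: Replaces the explicit two-pass partition (an accumulation loop plus a comprehension, concatenated) with a single stable sort keyed on non-membership, which by stability puts relevant docs first in original order.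
import Mathlib
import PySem

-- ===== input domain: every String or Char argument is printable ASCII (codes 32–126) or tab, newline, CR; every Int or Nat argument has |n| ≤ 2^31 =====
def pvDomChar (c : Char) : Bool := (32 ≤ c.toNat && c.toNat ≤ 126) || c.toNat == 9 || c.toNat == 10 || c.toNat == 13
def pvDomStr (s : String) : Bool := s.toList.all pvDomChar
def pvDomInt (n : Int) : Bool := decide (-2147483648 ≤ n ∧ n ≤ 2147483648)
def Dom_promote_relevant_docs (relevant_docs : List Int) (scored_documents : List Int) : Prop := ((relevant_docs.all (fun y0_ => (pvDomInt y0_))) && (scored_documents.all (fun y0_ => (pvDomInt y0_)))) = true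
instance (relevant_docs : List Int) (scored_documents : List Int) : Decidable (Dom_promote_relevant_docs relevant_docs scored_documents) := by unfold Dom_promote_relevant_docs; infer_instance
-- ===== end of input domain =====

-- B replaces A's explicit two-pass partition with one stable sort keyed on non-membership (more idiomatic, same result).


-- ===== PORT A =====
def promote_relevant_docs (relevant_docs : List Int) (scored_documents : List Int) : List Int :=
  if relevant_docs = [] then scored_documents
  else
    -- extracted_relevant_docs: the append loop
    let extracted_relevant_docs :=
      scored_documents.foldl
        (fun acc doc_id => if relevant_docs.contains doc_id then acc ++ [doc_id] else acc) []
    -- the comprehension [doc_id for doc_id in scored_documents if doc_id not in relevant_docs]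
    extracted_relevant_docs ++
      scored_documents.filter (fun doc_id => !(relevant_docs.contains doc_id))

-- ===== PORT B =====
def promote_relevant_docs_alt (relevant_docs : List Int) (scored_documents : List Int) : List Int :=
  if relevant_docs = [] then scored_documents
  else
    -- sorted(scored_documents, key=lambda d: d not in relevant_docs); bool key False/True ported as Int 0/1
    PySem.List.sorted scored_documents
      (fun d => if relevant_docs.contains d then (0 : Int) else 1)

-- ===== PRECONDITION & SPEC =====
def Spec_promote_relevant_docs (relevant_docs : List Int) (scored_documents : List Int) (out : List Int) : Prop := out = promote_relevant_docs_alt relevant_docs scored_documents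
instance (relevant_docs : List Int) (scored_documents : List Int) (out : List Int) : Decidable (Spec_promote_relevant_docs relevant_docs scored_documents out) := by unfold Spec_promote_relevant_docs; infer_instance

-- ===== CLAIM (what is proved, stated in full; the proofs are below) =====
def Claim_equal_promote_relevant_docs : Prop := ∀ (relevant_docs : List Int) (scored_documents : List Int), Dom_promote_relevant_docs relevant_docs scored_documents → Spec_promote_relevant_docs relevant_docs scored_documents (promote_relevant_docs relevant_docs scored_documents)

-- ===== LEMMAS AND PROOFS =====

-- key used by B: 0 for relevant, 1 for the rest
def pvKey (p : Int → Bool) (d : Int) : Int := if p d then 0 else 1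

-- inserting a relevant element into "zeros ++ ones" places it right after the zeros
theorem insertBy_key_zero (p : Int → Bool) (x : Int) (zs os : List Int)
    (hz : ∀ y ∈ zs, p y = true) (ho : ∀ y ∈ os, p y = false) (hx : p x = true) :
    PySem.List.insertBy (fun a b => decide (pvKey p a < pvKey p b)) x (zs ++ os)
      = (zs ++ [x]) ++ os := by
  induction zs with
  | nil =>
    cases os with
    | nil => simp [PySem.List.insertBy]
    | cons o os' =>
      have := ho o (by simp)
      simp [PySem.List.insertBy, pvKey, hx, this]
  | cons z zs' ih =>
    have hz0 := hz z (by simp)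
    simp only [List.cons_append, PySem.List.insertBy, pvKey, hx, hz0]
    simp only [if_true, lt_self_iff_false, decide_false, Bool.false_eq_true, if_false]
    have ih' := ih (fun y hy => hz y (List.mem_cons_of_mem _ hy))
    simp only [pvKey] at ih'
    rw [ih']

-- inserting a non-relevant element appends it at the end
theorem insertBy_key_one (p : Int → Bool) (x : Int) (acc : List Int) (hx : p x = false) :
    PySem.List.insertBy (fun a b => decide (pvKey p a < pvKey p b)) x acc = acc ++ [x] := by
  apply PySem.List.insertBy_of_forall_not_before
  intro y _
  by_cases h : p y = true <;> simp [pvKey, hx, h]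

-- the stable sort by the 0/1 key partitions: relevant first, others after, both in order
theorem foldl_insertBy_partition (p : Int → Bool) (xs zs os : List Int)
    (hz : ∀ y ∈ zs, p y = true) (ho : ∀ y ∈ os, p y = false) :
    xs.foldl (fun acc x => PySem.List.insertBy (fun a b => decide (pvKey p a < pvKey p b)) x acc)
        (zs ++ os)
      = (zs ++ xs.filter p) ++ (os ++ xs.filter (fun d => !(p d))) := by
  induction xs generalizing zs os with
  | nil => simp
  | cons x xs' ih =>
    by_cases hx : p x = true
    · have hz' : ∀ y ∈ zs ++ [x], p y = true := by
        intro y hy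
        rcases List.mem_append.1 hy with h | h
        · exact hz y h
        · simp at h; simpa [h] using hx
      simp only [List.foldl_cons, insertBy_key_zero p x zs os hz ho hx]
      rw [ih (zs ++ [x]) os hz' ho]
      simp [List.filter_cons, hx]
    · have hx' : p x = false := by simpa using hx
      have ho' : ∀ y ∈ os ++ [x], p y = false := by
        intro y hy
        rcases List.mem_append.1 hy with h | h
        · exact ho y h
        · simp at h; simpa [h] using hx'
      simp only [List.foldl_cons, ← List.append_assoc,
        insertBy_key_one p x (zs ++ os) hx']
      rw [List.append_assoc, ih zs (os ++ [x]) hz ho']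
      simp [List.filter_cons, hx']

theorem sorted_partition (p : Int → Bool) (xs : List Int) :
    PySem.List.sorted xs (pvKey p)
      = xs.filter p ++ xs.filter (fun d => !(p d)) := by
  rw [PySem.List.sorted_eq_foldl_insertBy]
  simpa using foldl_insertBy_partition p xs [] [] (by simp) (by simp)

-- ===== VERDICT (by name: the statement is the Claim_ definition above) =====
theorem promote_relevant_docs_spec : Claim_equal_promote_relevant_docs := by
  intro rel sc _
  unfold Spec_promote_relevant_docs promote_relevant_docs promote_relevant_docs_alt
  by_cases h : rel = []
  · simp [h]
  · simp only [if_neg h]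
    have hA := PySem.List.foldl_append_if (fun d => rel.contains d) (fun d => d) sc []
    simp only [List.nil_append] at hA
    rw [show (fun d => if rel.contains d then (0:Int) else 1) = pvKey (fun d => rel.contains d)
          from rfl,
        sorted_partition (fun d => rel.contains d) sc, hA]
    simp
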